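-- pv_equiv track=rewrite | github.com/astutic/ner-hft | train.py | read_iob_data
-- ===== SOURCE A (Python) =====
-- def read_iob_data(data_string):
--     sentences, tags = [], []
--     current_sent, current_tags = [], []
--
--     for line in data_string.split('\n'):
--         line = line.strip()
--         if line:
--             token, tag = line.split('\t')
--             current_sent.append(token)
--             current_tags.append(tag)
--         elif current_sent:
--             sentences.append(current_sent)
--             tags.append(current_tags)
--             current_sent, current_tags = [], []
--
--     if current_sent:
--         sentences.append(current_sent)
--         tags.append(current_tags)
--
--     return sentences, tags
-- ===== SOURCE B (Python) =====
-- from itertools import groupby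
--
--
-- def read_iob_data(data_string):
--     sentences, tags = [], []
--     stripped = (l.strip() for l in data_string.split('\n'))
--     for nonempty, group in groupby(stripped, key=bool):
--         if not nonempty:
--             continue
--         sent, sent_tags = [], []
--         for line in group:
--             token, tag = line.split('\t')
--             sent.append(token)
--             sent_tags.append(tag)
--         sentences.append(sent)
--         tags.append(sent_tags)
--     return sentences, tags
-- ===== Notes on version B (the rewrite author's own statement) =====
-- stated objective: simpler
-- what changed: Replaced A's running state machine (current_sent/current_tags with flush-on-blank and a trailing flush) by grouping consecutive non-empty stripped lines with itertools.groupby and converting each group to its (tokens, tags) pair.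
import Mathlib
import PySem

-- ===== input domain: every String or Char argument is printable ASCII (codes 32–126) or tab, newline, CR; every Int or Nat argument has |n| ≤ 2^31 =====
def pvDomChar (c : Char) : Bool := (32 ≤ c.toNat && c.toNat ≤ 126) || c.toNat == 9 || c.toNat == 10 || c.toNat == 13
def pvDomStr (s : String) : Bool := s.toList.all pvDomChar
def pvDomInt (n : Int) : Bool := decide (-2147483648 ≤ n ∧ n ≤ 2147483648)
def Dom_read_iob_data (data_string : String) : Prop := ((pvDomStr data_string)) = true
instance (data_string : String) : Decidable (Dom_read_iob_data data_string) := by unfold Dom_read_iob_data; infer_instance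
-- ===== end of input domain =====

-- B replaces A's running state machine by grouping consecutive non-empty stripped lines
-- (itertools.groupby) and converting each group to a (tokens, tags) pair: same cost, simpler decomposition.


-- ===== PORT A =====
-- Python's tuple unpacking of line.split on tab: under Pre_ the split has exactly two fields, ported as
-- fields 0 and 1 with getD (Python raises ValueError otherwise; those inputs are outside Pre_).
def read_iob_data (data_string : String) : List (List String) × List (List String) :=
  let st := ((PySem.Str.split? data_string "\n").getD []).foldl
    (fun (st : (List (List String) × List (List String)) × (List String × List String)) line =>
      let line := PySem.Str.strip line
      if line ≠ "" then
        let parts := (PySem.Str.split? line "\t").getD []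
        (st.1, (st.2.1 ++ [parts.getD 0 ""], st.2.2 ++ [parts.getD 1 ""]))
      else if st.2.1 ≠ [] then
        ((st.1.1 ++ [st.2.1], st.1.2 ++ [st.2.2]), ([], []))
      else st)
    (([], []), ([], []))
  if st.2.1 ≠ [] then (st.1.1 ++ [st.2.1], st.1.2 ++ [st.2.2]) else st.1

-- ===== PORT B =====
-- itertools.groupby(stripped, key=bool), keeping only the truthy groups:
-- maximal runs of non-empty strings.
def pvGroups : List String → List (List String)
  | [] => []
  | l :: ls =>
    if l = "" then pvGroups ls
    else (l :: ls.takeWhile (· ≠ "")) :: pvGroups (ls.dropWhile (· ≠ ""))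
termination_by ls => ls.length
decreasing_by
  all_goals first
    | (simp; done)
    | (simp only [List.length_cons]
       exact Nat.lt_succ_of_le (List.length_dropWhile_le _ _))

def read_iob_data_alt (data_string : String) : List (List String) × List (List String) :=
  let stripped := ((PySem.Str.split? data_string "\n").getD []).map PySem.Str.strip
  (pvGroups stripped).foldl
    (fun (acc : List (List String) × List (List String)) g =>
      let p := g.foldl
        (fun (p : List String × List String) line =>
          let parts := (PySem.Str.split? line "\t").getD []
          (p.1 ++ [parts.getD 0 ""], p.2 ++ [parts.getD 1 ""]))
        ([], [])
      (acc.1 ++ [p.1], acc.2 ++ [p.2]))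
    ([], [])

-- ===== PRECONDITION & SPEC =====
-- Pre_ excludes exactly the inputs on which Python A raises ValueError: a line whose strip is
-- non-empty but does not split on the tab character into exactly two fields.
def Pre_read_iob_data (data_string : String) : Prop :=
  ∀ line ∈ (PySem.Str.split? data_string "\n").getD [],
    PySem.Str.strip line ≠ "" →
      ((PySem.Str.split? (PySem.Str.strip line) "\t").getD []).length = 2
instance (data_string : String) : Decidable (Pre_read_iob_data data_string) := by
  unfold Pre_read_iob_data; infer_instance
def pvWitness_read_iob_data : String := "He\tO\nran\tO\n\nStop\tO"
def Spec_read_iob_data (data_string : String) (out : List (List String) × List (List String)) : Prop := out = read_iob_data_alt data_string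
instance (data_string : String) (out : List (List String) × List (List String)) : Decidable (Spec_read_iob_data data_string out) := by unfold Spec_read_iob_data; infer_instance

-- ===== CLAIM (what is proved, stated in full; the proofs are below) =====
def Claim_equal_read_iob_data : Prop := ∀ (data_string : String), Dom_read_iob_data data_string → Pre_read_iob_data data_string → Spec_read_iob_data data_string (read_iob_data data_string)

-- ===== LEMMAS AND PROOFS =====

-- A's loop body, over an already-stripped line.
def pvStepA (st : (List (List String) × List (List String)) × (List String × List String))
    (line : String) : (List (List String) × List (List String)) × (List String × List String) :=
  if line ≠ "" then
    let parts := (PySem.Str.split? line "\t").getD []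
    (st.1, (st.2.1 ++ [parts.getD 0 ""], st.2.2 ++ [parts.getD 1 ""]))
  else if st.2.1 ≠ [] then
    ((st.1.1 ++ [st.2.1], st.1.2 ++ [st.2.2]), ([], []))
  else st

def pvTok (line : String) : String := ((PySem.Str.split? line "\t").getD []).getD 0 ""
def pvTag (line : String) : String := ((PySem.Str.split? line "\t").getD []).getD 1 ""

def pvFinish (st : (List (List String) × List (List String)) × (List String × List String)) :
    List (List String) × List (List String) :=
  if st.2.1 ≠ [] then (st.1.1 ++ [st.2.1], st.1.2 ++ [st.2.2]) else st.1

def pvStepB (acc : List (List String) × List (List String)) (g : List String) :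
    List (List String) × List (List String) :=
  let p := g.foldl
    (fun (p : List String × List String) line =>
      let parts := (PySem.Str.split? line "\t").getD []
      (p.1 ++ [parts.getD 0 ""], p.2 ++ [parts.getD 1 ""]))
    ([], [])
  (acc.1 ++ [p.1], acc.2 ++ [p.2])

-- processing a run of non-empty lines just extends the current sentence
theorem pvRun (g : List String) (hg : ∀ l ∈ g, l ≠ "")
    (s t : List (List String)) (c ct : List String) :
    g.foldl pvStepA ((s, t), (c, ct))
      = ((s, t), (c ++ g.map pvTok, ct ++ g.map pvTag)) := by
  induction g generalizing c ct with
  | nil => simp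
  | cons l g ih =>
    have hl : l ≠ "" := hg l (List.mem_cons_self ..)
    simp only [List.foldl_cons, pvStepA, if_pos hl]
    rw [ih (fun x hx => hg x (List.mem_cons_of_mem _ hx))]
    simp [pvTok, pvTag]

-- B's inner loop over one group, from any accumulator pair
theorem pvGroupFold (g : List String) (a b : List String) :
    g.foldl
      (fun (p : List String × List String) line =>
        (p.1 ++ [((PySem.Str.split? line "\t").getD []).getD 0 ""],
         p.2 ++ [((PySem.Str.split? line "\t").getD []).getD 1 ""]))
      (a, b)
      = (a ++ g.map pvTok, b ++ g.map pvTag) := by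
  induction g generalizing a b with
  | nil => simp
  | cons l g ih =>
    simp only [List.foldl_cons]
    rw [ih]
    simp [pvTok, pvTag]

-- main invariant: from a flushed state, A's state machine computes B's fold over pvGroups
theorem pvMain (ms : List String) (s t : List (List String)) :
    pvFinish (ms.foldl pvStepA ((s, t), ([], [])))
      = (pvGroups ms).foldl pvStepB (s, t) := by
  match ms with
  | [] => simp [pvFinish, pvGroups]
  | l :: ls =>
    by_cases hl : l = ""
    · subst hl
      have hA : pvStepA ((s, t), ([], [])) "" = ((s, t), ([], [])) := by simp [pvStepA]
      have hG : pvGroups ("" :: ls) = pvGroups ls := by rw [pvGroups]; simp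
      rw [List.foldl_cons, hA, hG]
      exact pvMain ls s t
    · rw [pvGroups, if_neg hl]
      have hsplit : ls = ls.takeWhile (· ≠ "") ++ ls.dropWhile (· ≠ "") :=
        (List.takeWhile_append_dropWhile ..).symm
      have hgne : ∀ x ∈ ls.takeWhile (· ≠ ""), x ≠ "" := by
        intro x hx
        simpa using List.mem_takeWhile_imp hx
      have h1 : pvStepA ((s, t), ([], [])) l = ((s, t), ([pvTok l], [pvTag l])) := by
        simp [pvStepA, if_pos hl, pvTok, pvTag]
      have hB : pvStepB (s, t) (l :: ls.takeWhile (· ≠ ""))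
          = (s ++ [pvTok l :: (ls.takeWhile (· ≠ "")).map pvTok],
             t ++ [pvTag l :: (ls.takeWhile (· ≠ "")).map pvTag]) := by
        simp only [pvStepB, List.foldl_cons, List.nil_append]
        rw [pvGroupFold]
        simp [pvTok, pvTag]
      conv_lhs => rw [List.foldl_cons, h1, hsplit]
      rw [List.foldl_append, pvRun _ hgne]
      have hGnil : pvGroups [] = [] := by rw [pvGroups]
      rcases hd : ls.dropWhile (· ≠ "") with _ | ⟨e, d'⟩
      · rw [List.foldl_nil, hGnil, List.foldl_cons, List.foldl_nil, hB]
        simp [pvFinish]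
      · have he : e = "" := by
          have := List.head_dropWhile_not (· ≠ "") (l := ls)
            (by rw [hd]; exact List.cons_ne_nil _ _)
          simp only [hd] at this
          simpa using this
        subst he
        have h2 : pvStepA ((s, t),
              ([pvTok l] ++ (ls.takeWhile (· ≠ "")).map pvTok,
               [pvTag l] ++ (ls.takeWhile (· ≠ "")).map pvTag)) ""
            = ((s ++ [pvTok l :: (ls.takeWhile (· ≠ "")).map pvTok],
                t ++ [pvTag l :: (ls.takeWhile (· ≠ "")).map pvTag]), ([], [])) := by
          simp [pvStepA]
        rw [List.foldl_cons, h2]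
        have hlen : d'.length < (l :: ls).length := by
          have hle : (ls.dropWhile (· ≠ "")).length ≤ ls.length :=
            List.length_dropWhile_le _ _
          rw [hd] at hle
          simp only [List.length_cons] at hle ⊢
          omega
        rw [pvMain d']
        have hGd : pvGroups ("" :: d') = pvGroups d' := by rw [pvGroups]; simp
        rw [hGd, List.foldl_cons, hB]
termination_by ms.length
decreasing_by
  all_goals first | (simp; done) | exact hlen

-- ===== VERDICT (by name: the statement is the Claim_ definition above) =====
theorem read_iob_data_spec : Claim_equal_read_iob_data := by
  intro ds _ _
  show pvFinish (((PySem.Str.split? ds "\n").getD []).foldl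
      (fun st line => pvStepA st (PySem.Str.strip line)) (([], []), ([], [])))
    = (pvGroups (((PySem.Str.split? ds "\n").getD []).map PySem.Str.strip)).foldl
        pvStepB ([], [])
  rw [← List.foldl_map]
  exact pvMain (((PySem.Str.split? ds "\n").getD []).map PySem.Str.strip) [] []
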